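-- pv_equiv track=rewrite | github.com/Ssunbell/Algorithm_Study | 28주차/PRO_호텔방배정/PRO_호텔방배정_이승환.py | solution
-- ===== SOURCE A (Python) =====
-- def solution(k, room_number):
--     answer = []
--     room = dict()
--     for r in room_number:
--         room_list = []
--         while True:
--             try:
--                 p = room[r]
--                 room_list.append(r)
--                 r = p
--             except:
--                 room[r] = r+1
--                 answer.append(r)
--                 for i in room_list:
--                     room[i] = r+1
--                 break
--     return answer
-- ===== SOURCE B (Python) =====
-- def solution(k, room_number):
--     assigned = set()
--     answer = []
--     for r in room_number:
--         m = r
--         while m in assigned: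
--             m += 1
--         assigned.add(m)
--         answer.append(m)
--     return answer
-- ===== Notes on version B (the rewrite author's own statement) =====
-- stated objective: simpler
-- what changed: B drops the dict-based chain walk with manual path compression entirely and instead keeps a plain set of assigned rooms, scanning upward from the requested room to the first free one.
import Mathlib
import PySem

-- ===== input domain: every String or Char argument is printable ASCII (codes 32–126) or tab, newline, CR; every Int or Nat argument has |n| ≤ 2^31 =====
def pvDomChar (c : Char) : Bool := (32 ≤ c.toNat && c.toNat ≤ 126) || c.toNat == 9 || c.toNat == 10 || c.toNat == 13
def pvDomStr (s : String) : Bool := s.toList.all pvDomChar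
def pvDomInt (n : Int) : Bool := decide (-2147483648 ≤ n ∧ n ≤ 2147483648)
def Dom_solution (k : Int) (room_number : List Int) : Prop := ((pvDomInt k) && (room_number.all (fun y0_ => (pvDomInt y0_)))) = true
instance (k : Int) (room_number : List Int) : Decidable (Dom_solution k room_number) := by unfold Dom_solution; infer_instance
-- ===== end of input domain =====

-- B replaces A's dict chain-walk + manual path compression by a plain set of assigned
-- rooms and a linear upward scan to the first free room (simpler; not faster).

-- ===== PORT A =====
-- A's inner `while True` chain walk; fuel (room.size + 1, provably sufficient) only
-- makes the recursion structural, the computation is A's step for step.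
def solChain : Nat → PySem.Dict Int Int → Int → List Int → PySem.Dict Int Int × Int
  | 0, room, r, _ => (room, r)
  | fuel+1, room, r, roomList =>
    match room.get? r with
    | some p => solChain fuel room p (roomList ++ [r])
    | none => (roomList.foldl (fun d i => d.insert i (r + 1)) (room.insert r (r + 1)), r)

def solution (_k : Int) (room_number : List Int) : List Int :=
  (room_number.foldl
    (fun st r =>
      let res := solChain (st.2.size + 1) st.2 r []
      (st.1 ++ [res.2], res.1))
    (([] : List Int), (PySem.Dict.empty : PySem.Dict Int Int))).1

-- ===== PORT B =====
-- B's `while m in assigned: m += 1`; fuel (|assigned| + 1, provably sufficient) only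
-- makes the loop structural.
def findFree : Nat → PySem.Set Int → Int → Int
  | 0, _, m => m
  | fuel+1, s, m => if PySem.Set.contains s m then findFree fuel s (m + 1) else m

def solution_alt (_k : Int) (room_number : List Int) : List Int :=
  (room_number.foldl
    (fun st r =>
      let m := findFree (st.2.length + 1) st.2 r
      (st.1 ++ [m], PySem.Set.add st.2 m))
    (([] : List Int), (PySem.Set.empty : PySem.Set Int))).1

-- ===== PRECONDITION & SPEC =====
def Spec_solution (k : Int) (room_number : List Int) (out : List Int) : Prop := out = solution_alt k room_number
instance (k : Int) (room_number : List Int) (out : List Int) : Decidable (Spec_solution k room_number out) := by unfold Spec_solution; infer_instance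

-- ===== CLAIM (what is proved, stated in full; the proofs are below) =====
def Claim_equal_solution : Prop := ∀ (k : Int) (room_number : List Int), Dom_solution k room_number → Spec_solution k room_number (solution k room_number)

-- ===== LEMMAS AND PROOFS =====

-- A dict is Good when its keys are distinct, every stored pointer moves strictly up,
-- and every room between a key and its pointer is itself a key.
def Good (room : PySem.Dict Int Int) : Prop :=
  room.keys.Nodup ∧
  ∀ x v, room.get? x = some v →
    x < v ∧ ∀ m, x ≤ m → m < v → room.contains m = true

-- lookup through A's compression fold (all inserts carry the same value)
theorem get?_fold_insert_const (l : List Int) (d : PySem.Dict Int Int) (v x : Int) :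
    (l.foldl (fun d i => d.insert i v) d).get? x = if x ∈ l then some v else d.get? x := by
  induction l generalizing d with
  | nil => simp
  | cons a t ih =>
    simp only [List.foldl_cons, ih, PySem.Dict.get?_insert, List.mem_cons]
    by_cases hx : x ∈ t
    · simp [hx]
    · by_cases hxa : x = a <;> simp [hx, hxa]

theorem size_fold_insert_mem (l : List Int) (d : PySem.Dict Int Int) (v : Int)
    (h : ∀ i ∈ l, d.contains i = true) :
    (l.foldl (fun d i => d.insert i v) d).size = d.size := by
  induction l generalizing d with
  | nil => rfl
  | cons a t ih =>
    simp only [List.foldl_cons]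
    rw [ih, PySem.Dict.size_insert, if_pos (h a (by simp))]
    intro i hi
    rw [PySem.Dict.contains_insert]
    simp [h i (List.mem_cons_of_mem _ hi)]

-- correctness of A's chain walk: it returns the first room ≥ r that is not a key,
-- and the compressed dict stays Good with exactly one new key.
theorem solChain_spec (fuel : Nat) (room : PySem.Dict Int Int) (r : Int) (acc : List Int)
    (hg : Good room)
    (hacc : ∀ i ∈ acc, i < r ∧ ∀ m, i ≤ m → m < r → room.contains m = true)
    (hfuel : (room.keys.filter (fun x => decide (r ≤ x))).length < fuel) :
    r ≤ (solChain fuel room r acc).2 ∧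
    room.contains (solChain fuel room r acc).2 = false ∧
    (∀ m, r ≤ m → m < (solChain fuel room r acc).2 → room.contains m = true) ∧
    (∀ x, (solChain fuel room r acc).1.contains x
        = (x == (solChain fuel room r acc).2 || room.contains x)) ∧
    Good (solChain fuel room r acc).1 ∧
    (solChain fuel room r acc).1.size = room.size + 1 := by
  induction fuel generalizing r acc with
  | zero => omega
  | succ fuel ih =>
    match hget : room.get? r with
    | some p =>
      have hstep := hg.2 r p hget
      have hcr : room.contains r = true := by
        rw [PySem.Dict.contains_eq_isSome_get?, hget]; rfl
      have hrp : r < p := hstep.1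
      have hacc' : ∀ i ∈ acc ++ [r], i < p ∧
          ∀ m, i ≤ m → m < p → room.contains m = true := by
        intro i hi
        rcases List.mem_append.mp hi with hi | hi
        · obtain ⟨h1, h2⟩ := hacc i hi
          exact ⟨lt_trans h1 hrp, fun m hm1 hm2 => by
            by_cases hmr : m < r
            · exact h2 m hm1 hmr
            · exact hstep.2 m (by omega) hm2⟩
        · have hir : i = r := by simpa using hi
          subst hir
          exact ⟨hrp, fun m hm1 hm2 => hstep.2 m hm1 hm2⟩
      have hfuel' : (room.keys.filter (fun x => decide (p ≤ x))).length < fuel := by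
        have hrk : r ∈ room.keys.filter (fun x => decide (r ≤ x)) := by
          rw [List.mem_filter]
          exact ⟨(PySem.Dict.contains_iff_mem_keys room r).mp hcr, by simp⟩
        have heq : room.keys.filter (fun x => decide (p ≤ x))
            = (room.keys.filter (fun x => decide (r ≤ x))).filter (fun x => decide (p ≤ x)) := by
          rw [List.filter_filter]
          apply (List.filter_congr _).symm
          intro x _
          by_cases hpx : p ≤ x
          · have : r ≤ x := by omega
            simp [hpx, this]
          · simp [hpx]
        have hlt : ((room.keys.filter (fun x => decide (r ≤ x))).filter
              (fun x => decide (p ≤ x))).length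
            < (room.keys.filter (fun x => decide (r ≤ x))).length := by
          apply List.length_filter_lt_length_iff_exists.mpr
          exact ⟨r, hrk, by simp; omega⟩
        rw [heq]
        omega
      have hres := ih p (acc ++ [r]) hacc' hfuel'
      have hrw : solChain (fuel + 1) room r acc = solChain fuel room p (acc ++ [r]) := by
        simp [solChain, hget]
      rw [hrw]
      refine ⟨by omega, hres.2.1, ?_, hres.2.2.2.1, hres.2.2.2.2⟩
      intro m hm1 hm2
      by_cases hmp : m < p
      · exact hstep.2 m hm1 hmp
      · exact hres.2.2.1 m (by omega) hm2
    | none =>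
      have hrw : solChain (fuel + 1) room r acc
          = (acc.foldl (fun d i => d.insert i (r + 1)) (room.insert r (r + 1)), r) := by
        simp [solChain, hget]
      rw [hrw]
      have hcontr : room.contains r = false :=
        (PySem.Dict.get?_eq_none_iff_contains room r).mp hget
      have haccc : ∀ i ∈ acc, room.contains i = true := by
        intro i hi
        obtain ⟨h1, h2⟩ := hacc i hi
        exact h2 i le_rfl h1
      have hget' : ∀ x, (acc.foldl (fun d i => d.insert i (r + 1))
            (room.insert r (r + 1))).get? x
          = if x ∈ acc ∨ x = r then some (r + 1) else room.get? x := by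
        intro x
        rw [get?_fold_insert_const, PySem.Dict.get?_insert]
        by_cases hx : x ∈ acc
        · simp [hx]
        · by_cases hxr : x = r <;> simp [hxr]
      have hcont : ∀ x, (acc.foldl (fun d i => d.insert i (r + 1))
            (room.insert r (r + 1))).contains x = (x == r || room.contains x) := by
        intro x
        rw [PySem.Dict.contains_eq_isSome_get?, hget' x]
        by_cases hx : x ∈ acc
        · have := haccc x hx
          simp [hx, this]
        · by_cases hxr : x = r
          · simp [hxr]
          · simp [hx, hxr, PySem.Dict.contains_eq_isSome_get?]
      refine ⟨le_rfl, hcontr, by omega, hcont, ⟨?_, ?_⟩, ?_⟩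
      · exact PySem.Dict.nodup_keys_foldl_insert acc (fun _ _ => r + 1) _
          (PySem.Dict.nodup_keys_insert room r (r + 1) hg.1)
      · intro x v hxv
        rw [hget' x] at hxv
        by_cases hx : x ∈ acc ∨ x = r
        · rw [if_pos hx] at hxv
          have hv : v = r + 1 := by injection hxv; omega
          subst hv
          have hxr : x ≤ r := by
            rcases hx with hx | hx
            · exact le_of_lt (hacc x hx).1
            · omega
          refine ⟨by omega, ?_⟩
          intro m hm1 hm2
          rw [hcont m]
          by_cases hmr : m = r
          · simp [hmr]
          · have hmlt : m < r := by omega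
            rcases hx with hx | hx
            · have := (hacc x hx).2 m hm1 hmlt
              simp [this]
            · omega
        · rw [if_neg hx] at hxv
          obtain ⟨h1, h2⟩ := hg.2 x v hxv
          refine ⟨h1, ?_⟩
          intro m hm1 hm2
          rw [hcont m]
          simp [h2 m hm1 hm2]
      · rw [size_fold_insert_mem, PySem.Dict.size_insert, if_neg (by simp [hcontr])]
        intro i hi
        rw [PySem.Dict.contains_insert]
        simp [haccc i hi]

-- correctness of B's upward scan
theorem findFree_spec (fuel : Nat) (s : PySem.Set Int) (r a : Int)
    (ha : PySem.Set.contains s a = false) (hr : r ≤ a)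
    (hmem : ∀ m, r ≤ m → m < a → PySem.Set.contains s m = true)
    (hfuel : (a - r).toNat < fuel) :
    findFree fuel s r = a := by
  induction fuel generalizing r with
  | zero => omega
  | succ fuel ih =>
    by_cases hra : r = a
    · subst hra
      rw [findFree, if_neg (by rw [ha]; simp)]
    · have hlt : r < a := lt_of_le_of_ne hr hra
      have hc : PySem.Set.contains s r = true := hmem r le_rfl hlt
      rw [findFree, if_pos hc]
      exact ih (r + 1) (by omega) (fun m h1 h2 => hmem m (by omega) h2) (by omega)

-- all rooms of [r, a) lie in the nodup set s, so a - r ≤ |s|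
theorem span_le_card (s : List Int) (r a : Int)
    (hmem : ∀ m, r ≤ m → m < a → s.contains m = true) :
    (a - r).toNat ≤ s.length := by
  have hsub : ((List.range (a - r).toNat).map (fun (i : Nat) => r + (i : Int))) ⊆ s := by
    intro x hx
    simp only [List.mem_map, List.mem_range] at hx
    obtain ⟨i, hi, rfl⟩ := hx
    have := hmem (r + (i : Int)) (by omega) (by omega)
    rw [List.contains_eq_mem] at this
    simpa using this
  have hnd2 : ((List.range (a - r).toNat).map (fun (i : Nat) => r + (i : Int))).Nodup := by
    refine List.Nodup.map ?_ List.nodup_range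
    intro i j h
    have : (i : Int) = (j : Int) := by simpa using h
    omega
  have := (List.subperm_of_subset hnd2 hsub).length_le
  simpa using this

def StInv (room : PySem.Dict Int Int) (s : PySem.Set Int) : Prop :=
  Good room ∧ s.Nodup ∧ (∀ x, room.contains x = PySem.Set.contains s x) ∧
    room.size = s.length

theorem fold_eq (l : List Int) (ans : List Int) (room : PySem.Dict Int Int)
    (s : PySem.Set Int) (hinv : StInv room s) :
    (l.foldl (fun st r =>
        let res := solChain (st.2.size + 1) st.2 r []
        (st.1 ++ [res.2], res.1)) (ans, room)).1
    = (l.foldl (fun st r =>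
        let m := findFree (st.2.length + 1) st.2 r
        (st.1 ++ [m], PySem.Set.add st.2 m)) (ans, s)).1 := by
  induction l generalizing ans room s with
  | nil => rfl
  | cons r t ih =>
    obtain ⟨hgood, hnd, hcnt, hsz⟩ := hinv
    have hkeyslen : room.keys.length = room.size := by
      simp [PySem.Dict.keys, PySem.Dict.size]
    have hfuelA : (room.keys.filter (fun x => decide (r ≤ x))).length < room.size + 1 := by
      have := List.length_filter_le (fun x => decide (r ≤ x)) room.keys
      omega
    obtain ⟨hra, hcf, hrange, hcont, hgood', hsize⟩ :=
      solChain_spec (room.size + 1) room r [] hgood (by simp) hfuelA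
    set a := (solChain (room.size + 1) room r []).2 with hadef
    set room' := (solChain (room.size + 1) room r []).1 with hrdef
    have hcfs : PySem.Set.contains s a = false := by rw [← hcnt]; exact hcf
    have hranges : ∀ m, r ≤ m → m < a → PySem.Set.contains s m = true := by
      intro m h1 h2; rw [← hcnt]; exact hrange m h1 h2
    have hspan := span_le_card s r a hranges
    have hfind : findFree (s.length + 1) s r = a :=
      findFree_spec (s.length + 1) s r a hcfs hra hranges (by omega)
    have hadd : PySem.Set.add s a = s ++ [a] := by
      rw [PySem.Set.add, if_neg (by simp [PySem.Set.contains] at hcfs ⊢; exact hcfs)]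
    have hnotmem : a ∉ s := by
      rw [PySem.Set.contains, List.contains_eq_mem] at hcfs
      simpa using hcfs
    simp only [List.foldl_cons]
    rw [hfind]
    apply ih
    refine ⟨hgood', ?_, ?_, ?_⟩
    · rw [hadd]
      refine hnd.append (List.nodup_singleton a) ?_
      intro x hx hx2
      rw [List.mem_singleton] at hx2
      exact hnotmem (hx2 ▸ hx)
    · intro x
      rw [hcont x, hadd, PySem.Set.contains, List.contains_eq_mem]
      by_cases hx : x = a
      · simp [hx]
      · rw [hcnt x, PySem.Set.contains, List.contains_eq_mem]
        simp [hx]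
    · rw [hadd, List.length_append, hsize, hsz]
      simp

-- ===== VERDICT (by name: the statement is the Claim_ definition above) =====
theorem solution_spec : Claim_equal_solution := by
  intro k room_number _
  unfold Spec_solution solution solution_alt
  apply fold_eq
  refine ⟨⟨PySem.Dict.nodup_keys_empty, ?_⟩, List.nodup_nil, ?_, ?_⟩
  · intro x v h
    rw [PySem.Dict.get?_empty] at h
    exact absurd h (by simp)
  · intro x
    rw [PySem.Dict.contains_empty]
    rfl
  · rw [PySem.Dict.size_empty]
    rfl
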